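-- pv_equiv track=rewrite | github.com/Josh999999/Metalearning-Dataset-Recommendation-Tool | view_utils.py | avoid_duplicates
-- ===== SOURCE A (Python) =====
-- def avoid_duplicates(strings: list[str]) -> list[str]:
--     """
--     @param strings - List of strings for duplicates to be removed from
--
--     @return unique_strings - List of given strings made distinct (unique) from one another
--     """
--
--     seen_strings = {}
--     unique_strings = []
--
--
--     for string in strings:
--
--
--         if string in seen_strings:
--             seen_strings[string] += 1
--             new_string = f"{string}_{seen_strings[string]}"
--
--         else:
--             seen_strings[string] = 0
--             new_string = string
--
--
--         unique_strings.append(new_string)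
--
--
--     return unique_strings
-- ===== SOURCE B (Python) =====
-- def avoid_duplicates(strings: list[str]) -> list[str]:
--     """
--     @param strings - List of strings for duplicates to be removed from
--
--     @return unique_strings - List of given strings made distinct (unique) from one another
--     """
--     positions = {}
--     for i, s in enumerate(strings):
--         positions.setdefault(s, []).append(i)
--
--     out = [None] * len(strings)
--     for s, idxs in positions.items():
--         for k, i in enumerate(idxs):
--             out[i] = s if k == 0 else f"{s}_{k}"
--
--     return out
-- ===== Notes on version B (the rewrite author's own statement) =====
-- stated objective: alternative
-- what changed: Two-pass re-implementation: first build a dict mapping each distinct string to the ordered list of its positions, then fill a preallocated output list by position (plain string at the first occurrence, s_k at the k-th), instead of A's single pass with a running seen-count dict.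
import Mathlib
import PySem

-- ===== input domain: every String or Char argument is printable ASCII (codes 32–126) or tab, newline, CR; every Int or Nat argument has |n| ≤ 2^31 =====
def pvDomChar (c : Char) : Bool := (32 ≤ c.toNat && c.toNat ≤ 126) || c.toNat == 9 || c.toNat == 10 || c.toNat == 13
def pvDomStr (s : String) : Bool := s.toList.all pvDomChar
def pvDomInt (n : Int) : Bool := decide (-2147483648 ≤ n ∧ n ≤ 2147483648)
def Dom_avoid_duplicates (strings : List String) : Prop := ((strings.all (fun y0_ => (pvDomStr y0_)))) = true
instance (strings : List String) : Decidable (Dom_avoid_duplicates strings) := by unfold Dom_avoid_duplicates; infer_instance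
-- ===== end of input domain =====

-- B replaces A's single pass with a running seen-count dict by two passes: it first indexes
-- each distinct string's occurrence positions in a dict, then fills the output list by
-- position (objective: alternative decomposition).

-- ===== PORT A =====
/-- A's loop body: one iteration of `for string in strings`. -/
def pvStepA (st : PySem.Dict String Int × List String) (string : String) :
    PySem.Dict String Int × List String :=
  match st.1.get? string with
  | some v =>
      -- string in seen_strings: seen_strings[string] += 1; new_string = f"{string}_{seen_strings[string]}"
      let seen' := st.1.insert string (v + 1)
      (seen', st.2 ++ [string ++ "_" ++ PySem.Int.toStr (v + 1)])
  | none =>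
      -- seen_strings[string] = 0; new_string = string
      (st.1.insert string 0, st.2 ++ [string])

def avoid_duplicates (strings : List String) : List String :=
  (strings.foldl pvStepA (PySem.Dict.empty, [])).2

-- ===== PORT B =====
def avoid_duplicates_alt (strings : List String) : List String :=
  -- first pass: for i, s in enumerate(strings): positions.setdefault(s, []).append(i)
  let positions : PySem.Dict String (List Int) :=
    ((PySem.List.enumerate strings).map (fun p => (p.2, p.1))).foldl
      (fun d p => d.modify p.1 [] (fun l => l ++ [p.2])) PySem.Dict.empty
  -- out = [None] * len(strings)
  let out0 : List (Option String) := List.replicate strings.length (none : Option String)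
  -- second pass: for s, idxs in positions.items(): for k, i in enumerate(idxs): out[i] = ...
  -- (i is an index produced by enumerate, hence nonnegative, so .toNat is exact)
  let out := positions.items.foldl
    (fun out si =>
      (PySem.List.enumerate si.2).foldl
        (fun out ki =>
          out.set ki.2.toNat
            (some (if ki.1 = 0 then si.1 else si.1 ++ "_" ++ PySem.Int.toStr ki.1)))
        out)
    out0
  -- every position gets written exactly once, so no None placeholder survives
  out.map (fun o => o.getD "")

-- ===== PRECONDITION & SPEC =====
def Spec_avoid_duplicates (strings : List String) (out : List String) : Prop := out = avoid_duplicates_alt strings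
instance (strings : List String) (out : List String) : Decidable (Spec_avoid_duplicates strings out) := by unfold Spec_avoid_duplicates; infer_instance

-- ===== CLAIM (what is proved, stated in full; the proofs are below) =====
def Claim_equal_avoid_duplicates : Prop := ∀ (strings : List String), Dom_avoid_duplicates strings → Spec_avoid_duplicates strings (avoid_duplicates strings)

-- ===== LEMMAS AND PROOFS =====

/-- Decorated name of the occurrence preceded by `c` equal occurrences. -/
def pvDec (s : String) (c : Nat) : String :=
  if c = 0 then s else s ++ "_" ++ PySem.Int.toStr (c : Int)

/-- Common reference: decorate each element of `rest` with its count in the growing prefix. -/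
def pvRef (pre rest : List String) : List String :=
  match rest with
  | [] => []
  | s :: t => pvDec s (pre.count s) :: pvRef (pre ++ [s]) t

/-- A's loop invariant: the dict holds (count in prefix) - 1 for seen strings. -/
theorem pvA_gen (rest : List String) :
    ∀ (pre : List String) (d : PySem.Dict String Int) (acc : List String),
    (∀ x, d.get? x = if pre.count x = 0 then none else some ((pre.count x : Int) - 1)) →
    (rest.foldl pvStepA (d, acc)).2 = acc ++ pvRef pre rest := by
  induction rest with
  | nil => intro pre d acc _; simp [pvRef]
  | cons s t ih =>
    intro pre d acc hinv
    by_cases h0 : pre.count s = 0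
    · have hds : d.get? s = none := by rw [hinv s, if_pos h0]
      have hstep : pvStepA (d, acc) s = (d.insert s 0, acc ++ [s]) := by
        simp [pvStepA, hds]
      rw [List.foldl_cons, hstep,
        ih (pre ++ [s]) (d.insert s 0) (acc ++ [s]) ?_]
      · simp [pvRef, pvDec, h0]
      · intro x
        rw [PySem.Dict.get?_insert]
        by_cases hx : x = s
        · subst hx; simp [List.count_append, h0]
        · have hsx : ¬ s = x := fun h => hx h.symm
          simp [hx, hsx, hinv x, List.count_append]
    · have hds : d.get? s = some ((pre.count s : Int) - 1) := by rw [hinv s, if_neg h0]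
      have hv : (pre.count s : Int) - 1 + 1 = (pre.count s : Int) := by ring
      have hstep : pvStepA (d, acc) s =
          (d.insert s (pre.count s : Int),
           acc ++ [s ++ "_" ++ PySem.Int.toStr (pre.count s : Int)]) := by
        simp [pvStepA, hds, hv]
      rw [List.foldl_cons, hstep,
        ih (pre ++ [s]) (d.insert s (pre.count s : Int)) _ ?_]
      · simp [pvRef, pvDec, h0]
      · intro x
        rw [PySem.Dict.get?_insert]
        by_cases hx : x = s
        · subst hx
          simp [List.count_append, h0]
        · have hsx : ¬ s = x := fun h => hx h.symm
          simp [hx, hsx, hinv x, List.count_append]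

theorem pvRef_length (rest : List String) : ∀ (pre : List String),
    (pvRef pre rest).length = rest.length := by
  induction rest with
  | nil => intro pre; simp [pvRef]
  | cons s t ih => intro pre; simp [pvRef, ih]

theorem pvRef_getElem? (rest : List String) : ∀ (pre : List String) (j : Nat)
    (hj : j < rest.length),
    (pvRef pre rest)[j]? = some (pvDec rest[j] ((pre ++ rest.take j).count rest[j])) := by
  induction rest with
  | nil => intro pre j hj; simp at hj
  | cons s t ih =>
    intro pre j hj
    cases j with
    | zero => simp [pvRef]
    | succ j =>
      have hj' : j < t.length := by simpa using hj
      simp only [pvRef, List.getElem?_cons_succ, List.getElem_cons_succ, List.take_succ_cons]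
      rw [ih (pre ++ [s]) j hj']
      simp [List.append_assoc]

/-- Positions of `s` in `strings` (the Int indices produced by enumerate). -/
def pvIdxs (strings : List String) (s : String) : List Int :=
  ((PySem.List.enumerate strings).filter (fun p => p.2 == s)).map (fun p => p.1)

/-- All writes of B's second pass, flattened: (target index, value written). -/
def pvWrites (strings : List String) : List (Nat × Option String) :=
  (PySem.List.dedup strings).flatMap (fun s =>
    (PySem.List.enumerate (pvIdxs strings s)).map (fun ki =>
      (ki.2.toNat, some (if ki.1 = 0 then s else s ++ "_" ++ PySem.Int.toStr ki.1))))

/-- The dict built by B's first pass lists each distinct string with its positions. -/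
theorem pvItems (strings : List String) :
    (((PySem.List.enumerate strings).map (fun p => (p.2, p.1))).foldl
      (fun d p => d.modify p.1 [] (fun l => l ++ [p.2])) PySem.Dict.empty).items
    = (PySem.List.dedup strings).map (fun s => (s, pvIdxs strings s)) := by
  have hfst : ((PySem.List.enumerate strings).map (fun p => (p.2, p.1))).map (fun p => p.1)
      = strings := by
    rw [List.map_map]
    exact PySem.List.map_snd_enumerate strings 0
  have hkeys : (((PySem.List.enumerate strings).map (fun p => (p.2, p.1))).foldl
      (fun d p => d.modify p.1 [] (fun l => l ++ [p.2])) PySem.Dict.empty).keys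
      = PySem.List.dedup strings := by
    have h0 := PySem.Dict.keys_foldl_modify_key
      (l := (PySem.List.enumerate strings).map (fun p => (p.2, p.1)))
      (key := fun p => p.1) (d0 := ([] : List Int))
      (f := fun _ p => fun l => l ++ [p.2]) (d := PySem.Dict.empty)
    rw [h0, PySem.Dict.keys_empty, hfst, PySem.List.dedup_eq_ofList]
    rfl
  have hnodup := hkeys ▸ PySem.List.nodup_dedup strings
  rw [PySem.Dict.items_eq_map_keys _ hnodup [], hkeys]
  apply List.map_congr_left
  intro s _
  have hg := PySem.Dict.getD_foldl_modify_append
    ((PySem.List.enumerate strings).map (fun p => (p.2, p.1))) PySem.Dict.empty s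
  rw [PySem.Dict.getD_empty] at hg
  rw [hg]
  simp [pvIdxs, List.filter_map, List.map_map, Function.comp_def]

/-- B's result is a flat scatter of `pvWrites` over the None placeholders. -/
theorem pvAlt_eq_writes (strings : List String) :
    avoid_duplicates_alt strings
    = ((pvWrites strings).foldl (fun l q => l.set q.1 q.2)
        (List.replicate strings.length (none : Option String))).map (fun o => o.getD "") := by
  simp only [avoid_duplicates_alt]
  rw [pvItems]
  simp only [pvWrites, List.foldl_flatMap, List.foldl_map]

/-- At occurrence number `(xs.take j).count s` the position list of `s` holds index `a + j`. -/
theorem pvOcc (xs : List String) : ∀ (s : String) (a : Int) (j : Nat)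
    (hj : j < xs.length), xs[j] = s →
    (((PySem.List.enumerate xs a).filter (fun p => p.2 == s)).map
      (fun p => p.1))[(xs.take j).count s]? = some (a + j) := by
  induction xs with
  | nil => intro s a j hj; simp at hj
  | cons x t ih =>
    intro s a j hj hs
    rw [PySem.List.enumerate_cons]
    cases j with
    | zero =>
      simp only [List.getElem_cons_zero] at hs
      subst hs
      simp
    | succ j =>
      have hj' : j < t.length := by simpa using hj
      simp only [List.getElem_cons_succ] at hs
      have hIH := ih s (a + 1) j hj' hs
      by_cases hx : x = s
      · subst hx
        rw [List.filter_cons_of_pos (by simp), List.map_cons]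
        have hc : ((x :: t).take (j + 1)).count x = (t.take j).count x + 1 := by
          simp [List.take_succ_cons]
        rw [hc, List.getElem?_cons_succ, hIH]
        congr 1
        push_cast
        ring
      · rw [List.filter_cons_of_neg (by simp [hx])]
        have hc : ((x :: t).take (j + 1)).count s = (t.take j).count s := by
          simp [List.take_succ_cons, hx]
        rw [hc, hIH]
        congr 1
        push_cast
        ring

theorem pvIdxs_mem (strings : List String) (s : String) (i : Int)
    (h : i ∈ pvIdxs strings s) :
    ∃ (k : Nat) (hk : k < strings.length), i = (k : Int) ∧ strings[k] = s := by
  unfold pvIdxs at h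
  obtain ⟨p, hp, hpi⟩ := List.mem_map.1 h
  obtain ⟨hpmem, hps⟩ := List.mem_filter.1 hp
  obtain ⟨k, hk, hpe⟩ := (PySem.List.mem_enumerate_iff _ _ _).1 hpmem
  subst hpe
  refine ⟨k, hk, by simpa using hpi.symm, by simpa using hps⟩

theorem pvIdxs_pairwise (strings : List String) (s : String) :
    (pvIdxs strings s).Pairwise (· < ·) := by
  unfold pvIdxs
  exact List.pairwise_map.2 ((PySem.List.pairwise_lt_enumerate strings 0).filter _)

theorem pvBlock_targets (strings : List String) (s : String) :
    (PySem.List.enumerate (pvIdxs strings s)).map (fun ki => ki.2.toNat)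
      = (pvIdxs strings s).map Int.toNat := by
  conv_rhs => rw [← PySem.List.map_snd_enumerate (pvIdxs strings s) 0]
  rw [List.map_map]
  rfl

theorem pvBlockT_mem (strings : List String) (s : String) (x : Nat)
    (h : x ∈ (pvIdxs strings s).map Int.toNat) :
    ∃ (hx : x < strings.length), strings[x] = s := by
  obtain ⟨i, hi, hxe⟩ := List.mem_map.1 h
  obtain ⟨k, hk, hik, hsk⟩ := pvIdxs_mem strings s i hi
  subst hik
  subst hxe
  simp only [Int.toNat_natCast]
  exact ⟨hk, hsk⟩

theorem pvBlockT_nodup (strings : List String) (s : String) :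
    ((pvIdxs strings s).map Int.toNat).Nodup := by
  have hpw := pvIdxs_pairwise strings s
  have hnn : ∀ i ∈ pvIdxs strings s, 0 ≤ i := by
    intro i hi
    obtain ⟨k, hk, hik, _⟩ := pvIdxs_mem strings s i hi
    subst hik
    positivity
  refine List.Nodup.map_on ?_ hpw.nodup
  intro a ha b hb hab
  have h1 := hnn a ha
  have h2 := hnn b hb
  omega

theorem pvWrites_targets_nodup (strings : List String) :
    ((pvWrites strings).map (fun q => q.1)).Nodup := by
  unfold pvWrites
  rw [List.map_flatMap]
  have hrw : ∀ s : String,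
      ((PySem.List.enumerate (pvIdxs strings s)).map (fun ki =>
        (ki.2.toNat, some (if ki.1 = 0 then s else s ++ "_" ++ PySem.Int.toStr ki.1)))).map
          (fun q => q.1)
      = (pvIdxs strings s).map Int.toNat := by
    intro s
    rw [List.map_map, ← pvBlock_targets strings s]
    rfl
  simp only [hrw]
  apply List.nodup_flatMap.2
  refine ⟨fun s _ => pvBlockT_nodup strings s, ?_⟩
  have hnd : (PySem.List.dedup strings).Pairwise (fun a b => a ≠ b) :=
    PySem.List.nodup_dedup strings
  refine List.Pairwise.imp_of_mem ?_ hnd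
  intro s s' hs hs' hne x hx hx'
  obtain ⟨h1, e1⟩ := pvBlockT_mem strings s x hx
  obtain ⟨h2, e2⟩ := pvBlockT_mem strings s' x hx'
  exact hne (e1 ▸ e2 ▸ rfl)

theorem pvFoldSet_length {α : Type} (W : List (Nat × α)) : ∀ (l : List α),
    (W.foldl (fun l q => l.set q.1 q.2) l).length = l.length := by
  induction W with
  | nil => intro l; rfl
  | cons q t ih => intro l; rw [List.foldl_cons, ih, List.length_set]

theorem pvFoldSet_not_mem {α : Type} (W : List (Nat × α)) : ∀ (l : List α) (j : Nat),
    j ∉ W.map (fun q => q.1) →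
    (W.foldl (fun l q => l.set q.1 q.2) l)[j]? = l[j]? := by
  induction W with
  | nil => intro l j _; rfl
  | cons q t ih =>
    intro l j hj
    rw [List.map_cons, List.mem_cons] at hj
    push Not at hj
    rw [List.foldl_cons, ih _ j hj.2, List.getElem?_set_ne (fun h => hj.1 h.symm)]

theorem pvFoldSet_mem {α : Type} (W : List (Nat × α)) : ∀ (l : List α) (j : Nat) (v : α),
    (W.map (fun q => q.1)).Nodup → (j, v) ∈ W → j < l.length →
    (W.foldl (fun l q => l.set q.1 q.2) l)[j]? = some v := by
  induction W with
  | nil => intro _ _ _ _ h; simp at h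
  | cons q t ih =>
    intro l j v hnd hmem hj
    rw [List.map_cons] at hnd
    have hq1 : q.1 ∉ t.map (fun q => q.1) := (List.nodup_cons.1 hnd).1
    have hnd' := (List.nodup_cons.1 hnd).2
    rw [List.foldl_cons]
    rcases List.mem_cons.1 hmem with heq | hmem'
    · obtain rfl := heq.symm
      rw [pvFoldSet_not_mem t _ j hq1]
      exact List.getElem?_set_self hj
    · exact ih (l.set q.1 q.2) j v hnd' hmem' (by rw [List.length_set]; exact hj)

theorem pvWrites_mem (strings : List String) (j : Nat) (hj : j < strings.length) :
    (j, some (pvDec strings[j] ((strings.take j).count strings[j]))) ∈ pvWrites strings := by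
  unfold pvWrites
  apply List.mem_flatMap.2
  refine ⟨strings[j], (PySem.List.mem_dedup _ _).2 (List.getElem_mem hj), ?_⟩
  apply List.mem_map.2
  refine ⟨(((strings.take j).count strings[j] : Int), (j : Int)), ?_, ?_⟩
  · have hocc := pvOcc strings strings[j] 0 j hj rfl
    have hidx : (pvIdxs strings strings[j])[(strings.take j).count strings[j]]? = some (j : Int) := by
      unfold pvIdxs
      simpa using hocc
    apply List.mem_of_getElem? (i := (strings.take j).count strings[j])
    rw [PySem.List.getElem?_enumerate, hidx]
    simp
  · by_cases hc0 : (strings.take j).count strings[j] = 0 <;>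
      simp [pvDec, hc0]

theorem pvAlt_eq_ref (strings : List String) :
    avoid_duplicates_alt strings = pvRef [] strings := by
  rw [pvAlt_eq_writes]
  apply List.ext_getElem?
  intro i
  by_cases hi : i < strings.length
  · rw [List.getElem?_map,
      pvFoldSet_mem (pvWrites strings) _ i _
        (pvWrites_targets_nodup strings) (pvWrites_mem strings i hi)
        (by rw [List.length_replicate]; exact hi),
      pvRef_getElem? strings [] i hi]
    simp
  · have h1 : (((pvWrites strings).foldl (fun l q => l.set q.1 q.2)
        (List.replicate strings.length (none : Option String))).map (fun o => o.getD ""))[i]?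
        = none := by
      apply List.getElem?_eq_none
      rw [List.length_map, pvFoldSet_length, List.length_replicate]
      omega
    have h2 : (pvRef [] strings)[i]? = none := by
      apply List.getElem?_eq_none
      rw [pvRef_length]
      omega
    rw [h1, h2]

-- ===== VERDICT (by name: the statement is the Claim_ definition above) =====
theorem avoid_duplicates_spec : Claim_equal_avoid_duplicates := by
  intro strings _
  show avoid_duplicates strings = avoid_duplicates_alt strings
  have hA : avoid_duplicates strings = pvRef [] strings := by
    unfold avoid_duplicates
    rw [pvA_gen strings [] PySem.Dict.empty []
      (by intro x; simp [PySem.Dict.get?_empty])]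
    simp
  rw [hA, pvAlt_eq_ref]
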